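-- pv_equiv track=rewrite | github.com/ry86pkqf74-rgb/ROS_FLOW_2_1 | researchflow-production-main/services/worker/src/workflow_engine/stages/stage_04_hypothesis.py | _generate_hypothesis_variants
-- ===== SOURCE A (Python) =====
-- from typing import Any, Dict, List, Optional
--
-- def _generate_hypothesis_variants(
--
--     original: str,
--     gaps: List[str],
--     literature_findings: Dict[str, Any],
--     columns: List[str]
-- ) -> tuple[str, List[str]]:
--     """Generate refined hypothesis and secondary hypotheses."""
--     # Use gaps to refine
--     refined = original
--
--     # If gaps suggest specific directions, incorporate them
--     if gaps:
--         # Simple refinement: add gap context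
--         gap_context = gaps[0] if gaps else ""
--         if "limited" in gap_context.lower() or "missing" in gap_context.lower():
--             refined = f"{original} This study addresses the gap in {gap_context.lower()}."
--
--     # Generate secondary hypotheses (2-3 alternatives)
--     secondary = []
--
--     # Variant 1: More specific population
--     if columns:
--         # Try to infer population from columns
--         population_indicators = [c for c in columns if any(term in c.lower() for term in ["age", "gender", "sex", "race", "ethnicity"])]
--         if population_indicators:
--             secondary.append(f"{original} Specifically focusing on {population_indicators[0]} as a key factor.")
--
--     # Variant 2: Different outcome focus
--     outcome_indicators = [c for c in columns if any(term in c.lower() for term in ["outcome", "result", "event", "score", "measure"])]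
--     if outcome_indicators and len(outcome_indicators) > 0:
--         secondary.append(f"{original} With emphasis on {outcome_indicators[0]} as primary outcome.")
--
--     # Variant 3: Temporal or longitudinal aspect
--     time_indicators = [c for c in columns if any(term in c.lower() for term in ["time", "date", "follow", "baseline", "visit"])]
--     if time_indicators:
--         secondary.append(f"{original} Examining changes over time using {time_indicators[0]}.")
--
--     # Ensure we have at least 2 secondary hypotheses
--     if len(secondary) < 2:
--         secondary.append(f"{original} Exploring alternative mechanisms and pathways.")
--         if len(secondary) < 2:
--             secondary.append(f"{original} With focus on clinical significance and practical implications.")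
--
--     return refined, secondary[:3]  # Limit to 3 secondary hypotheses
-- ===== SOURCE B (Python) =====
-- from typing import Any, Dict, List
--
-- _POP_TERMS = ["age", "gender", "sex", "race", "ethnicity"]
-- _OUT_TERMS = ["outcome", "result", "event", "score", "measure"]
-- _TIME_TERMS = ["time", "date", "follow", "baseline", "visit"]
--
--
-- def _generate_hypothesis_variants(
--     original: str,
--     gaps: List[str],
--     literature_findings: Dict[str, Any],
--     columns: List[str],
-- ) -> tuple[str, List[str]]:
--     """Single pass over columns: record the first column hitting each category."""
--     refined = original
--     if gaps:
--         gap_context = gaps[0]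
--         low = gap_context.lower()
--         if "limited" in low or "missing" in low:
--             refined = f"{original} This study addresses the gap in {low}."
--
--     first_pop = first_out = first_time = None
--     for c in columns:
--         cl = c.lower()
--         if first_pop is None and any(t in cl for t in _POP_TERMS):
--             first_pop = c
--         if first_out is None and any(t in cl for t in _OUT_TERMS):
--             first_out = c
--         if first_time is None and any(t in cl for t in _TIME_TERMS):
--             first_time = c
--
--     secondary = []
--     if first_pop is not None:
--         secondary.append(f"{original} Specifically focusing on {first_pop} as a key factor.")
--     if first_out is not None:
--         secondary.append(f"{original} With emphasis on {first_out} as primary outcome.")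
--     if first_time is not None:
--         secondary.append(f"{original} Examining changes over time using {first_time}.")
--
--     if len(secondary) < 2:
--         secondary.append(f"{original} Exploring alternative mechanisms and pathways.")
--         if len(secondary) < 2:
--             secondary.append(f"{original} With focus on clinical significance and practical implications.")
--
--     return refined, secondary[:3]
-- ===== Notes on version B (the rewrite author's own statement) =====
-- stated objective: alternative
-- what changed: B replaces A's three separate list-comprehension filter passes over columns by a single loop that records only the first matching column per category (population/outcome/time) and then emits the sentences from those first-matches.
import Mathlib
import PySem

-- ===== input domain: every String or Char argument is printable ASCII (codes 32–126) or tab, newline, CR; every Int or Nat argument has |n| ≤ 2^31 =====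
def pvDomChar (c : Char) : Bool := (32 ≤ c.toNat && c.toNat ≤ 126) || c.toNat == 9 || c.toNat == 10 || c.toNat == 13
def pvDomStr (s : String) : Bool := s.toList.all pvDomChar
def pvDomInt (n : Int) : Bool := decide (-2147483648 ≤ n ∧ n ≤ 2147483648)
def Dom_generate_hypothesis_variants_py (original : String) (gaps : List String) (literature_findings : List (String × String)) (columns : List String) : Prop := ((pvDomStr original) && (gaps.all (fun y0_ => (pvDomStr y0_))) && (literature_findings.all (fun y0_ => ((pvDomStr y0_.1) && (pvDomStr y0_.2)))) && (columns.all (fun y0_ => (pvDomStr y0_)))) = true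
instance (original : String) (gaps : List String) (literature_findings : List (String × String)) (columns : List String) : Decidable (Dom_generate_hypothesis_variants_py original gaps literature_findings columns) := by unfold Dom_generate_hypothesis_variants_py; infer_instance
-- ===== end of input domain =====

-- B replaces A's three separate filter passes over `columns` by one single pass that
-- records the first matching column per category (alternative decomposition, same cost).


-- ===== PORT A =====
-- shared vocabulary: `any(term in c.lower() for term in terms)`
def pvAnyIn (terms : List String) (cl : String) : Bool :=
  terms.any (fun t => PySem.Str.isIn t cl)

def pvPopTerms : List String := ["age", "gender", "sex", "race", "ethnicity"]
def pvOutTerms : List String := ["outcome", "result", "event", "score", "measure"]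
def pvTimeTerms : List String := ["time", "date", "follow", "baseline", "visit"]

def pvHitPop (c : String) : Bool := pvAnyIn pvPopTerms (PySem.Str.lower c)
def pvHitOut (c : String) : Bool := pvAnyIn pvOutTerms (PySem.Str.lower c)
def pvHitTime (c : String) : Bool := pvAnyIn pvTimeTerms (PySem.Str.lower c)

def generate_hypothesis_variants_py (original : String) (gaps : List String) (literature_findings : List (String × String)) (columns : List String) : String × List String :=
  let refined :=
    match gaps with
    | [] => original
    | g :: _ =>
      let gl := PySem.Str.lower g
      if PySem.Str.isIn "limited" gl || PySem.Str.isIn "missing" gl then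
        original ++ " This study addresses the gap in " ++ gl ++ "."
      else original
  let secondary : List String := []
  let secondary :=
    if columns.isEmpty then secondary
    else
      let pop := columns.filter pvHitPop
      if pop.isEmpty then secondary
      else secondary ++ [original ++ " Specifically focusing on " ++ PySem.List.pyGetD pop 0 "" ++ " as a key factor."]
  let outInd := columns.filter pvHitOut
  let secondary :=
    if !outInd.isEmpty && decide ((0 : Int) < PySem.List.len outInd) then
      secondary ++ [original ++ " With emphasis on " ++ PySem.List.pyGetD outInd 0 "" ++ " as primary outcome."]
    else secondary
  let timeInd := columns.filter pvHitTime
  let secondary :=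
    if timeInd.isEmpty then secondary
    else secondary ++ [original ++ " Examining changes over time using " ++ PySem.List.pyGetD timeInd 0 "" ++ "."]
  let secondary :=
    if secondary.length < 2 then
      let s2 := secondary ++ [original ++ " Exploring alternative mechanisms and pathways."]
      if s2.length < 2 then s2 ++ [original ++ " With focus on clinical significance and practical implications."]
      else s2
    else secondary
  (refined, PySem.List.slice secondary none (some 3))

-- ===== PORT B =====
-- one fold step: record the first column hitting each of the three categories
def pvStep (acc : Option String × Option String × Option String) (c : String) : Option String × Option String × Option String :=
  let cl := PySem.Str.lower c
  let p := match acc.1 with | some x => some x | none => if pvAnyIn pvPopTerms cl then some c else none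
  let o := match acc.2.1 with | some x => some x | none => if pvAnyIn pvOutTerms cl then some c else none
  let t := match acc.2.2 with | some x => some x | none => if pvAnyIn pvTimeTerms cl then some c else none
  (p, o, t)

def generate_hypothesis_variants_py_alt (original : String) (gaps : List String) (literature_findings : List (String × String)) (columns : List String) : String × List String :=
  let refined :=
    match gaps with
    | [] => original
    | g :: _ =>
      let gl := PySem.Str.lower g
      if PySem.Str.isIn "limited" gl || PySem.Str.isIn "missing" gl then
        original ++ " This study addresses the gap in " ++ gl ++ "."
      else original
  let firsts := columns.foldl pvStep (none, none, none)
  let secondary : List String := []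
  let secondary :=
    match firsts.1 with
    | none => secondary
    | some p => secondary ++ [original ++ " Specifically focusing on " ++ p ++ " as a key factor."]
  let secondary :=
    match firsts.2.1 with
    | none => secondary
    | some o => secondary ++ [original ++ " With emphasis on " ++ o ++ " as primary outcome."]
  let secondary :=
    match firsts.2.2 with
    | none => secondary
    | some t => secondary ++ [original ++ " Examining changes over time using " ++ t ++ "."]
  let secondary :=
    if secondary.length < 2 then
      let s2 := secondary ++ [original ++ " Exploring alternative mechanisms and pathways."]
      if s2.length < 2 then s2 ++ [original ++ " With focus on clinical significance and practical implications."]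
      else s2
    else secondary
  (refined, PySem.List.slice secondary none (some 3))

-- ===== PRECONDITION & SPEC =====
def Spec_generate_hypothesis_variants_py (original : String) (gaps : List String) (literature_findings : List (String × String)) (columns : List String) (out : String × List String) : Prop := out = generate_hypothesis_variants_py_alt original gaps literature_findings columns
instance (original : String) (gaps : List String) (literature_findings : List (String × String)) (columns : List String) (out : String × List String) : Decidable (Spec_generate_hypothesis_variants_py original gaps literature_findings columns out) := by unfold Spec_generate_hypothesis_variants_py; infer_instance

-- ===== CLAIM (what is proved, stated in full; the proofs are below) =====
def Claim_equal_generate_hypothesis_variants_py : Prop := ∀ (original : String) (gaps : List String) (literature_findings : List (String × String)) (columns : List String), Dom_generate_hypothesis_variants_py original gaps literature_findings columns → Spec_generate_hypothesis_variants_py original gaps literature_findings columns (generate_hypothesis_variants_py original gaps literature_findings columns)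

-- ===== LEMMAS AND PROOFS =====
-- B's fold computes, per category, the head of A's filter (unless already found)
def pvUpd (p : String → Bool) (o : Option String) (cols : List String) : Option String :=
  match o with
  | some x => some x
  | none => (cols.filter p).head?

theorem pvUpd_cons (p : String → Bool) (o : Option String) (c : String) (cs : List String) :
    pvUpd p o (c :: cs) =
      pvUpd p (match o with | some x => some x | none => if p c then some c else none) cs := by
  cases o with
  | some x => rfl
  | none =>
    by_cases hp : p c
    · simp only [pvUpd, List.filter_cons, hp, if_true, List.head?_cons]
    · simp only [pvUpd, List.filter_cons, hp, Bool.false_eq_true, if_false]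

theorem pvCondLen (x : String) (l : List String) :
    (!(x :: l).isEmpty && decide ((0 : Int) < PySem.List.len (x :: l))) = true := by
  simp [PySem.List.len_eq]

theorem pvFold (cols : List String) (s : Option String × Option String × Option String) :
    cols.foldl pvStep s = (pvUpd pvHitPop s.1 cols, pvUpd pvHitOut s.2.1 cols, pvUpd pvHitTime s.2.2 cols) := by
  induction cols generalizing s with
  | nil => rcases s with ⟨a, b, c⟩; cases a <;> cases b <;> cases c <;> rfl
  | cons c cs ih =>
    rw [List.foldl_cons, ih]
    rcases s with ⟨a, b, t⟩
    rw [pvUpd_cons pvHitPop a c cs, pvUpd_cons pvHitOut b c cs, pvUpd_cons pvHitTime t c cs]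
    rfl

-- ===== VERDICT (by name: the statement is the Claim_ definition above) =====
set_option maxHeartbeats 1600000 in
theorem generate_hypothesis_variants_py_spec : Claim_equal_generate_hypothesis_variants_py := by
  intro original gaps lf columns _
  unfold Spec_generate_hypothesis_variants_py
  cases columns with
  | nil => rfl
  | cons c cs =>
    show generate_hypothesis_variants_py _ _ _ _ = _
    unfold generate_hypothesis_variants_py generate_hypothesis_variants_py_alt
    simp only [pvFold, pvUpd]
    cases h1 : (c :: cs).filter pvHitPop <;>
      cases h2 : (c :: cs).filter pvHitOut <;>
        cases h3 : (c :: cs).filter pvHitTime <;>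
          (try rw [pvCondLen]) <;> (try simp only [PySem.List.pyGetD_zero_cons]) <;> rfl
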